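-- pv_equiv track=rewrite | github.com/k-harada/AtCoder | ABC/ABC272/C.py | solve
-- ===== SOURCE A (Python) =====
-- def solve(n, a_list):
--     even = []
--     odd = []
--     for a in a_list:
--         if a % 2 == 0:
--             even.append(a)
--         else:
--             odd.append(a)
--     even = list(sorted(even))
--     odd = list(sorted(odd))
--     res = -1
--     if len(even) >= 2:
--         res = max(res, even[-1] + even[-2])
--     if len(odd) >= 2:
--         res = max(res, odd[-1] + odd[-2])
--     return res
-- ===== SOURCE B (Python) =====
-- def solve(n, a_list):
--     e1 = e2 = o1 = o2 = None
--     for a in a_list: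
--         if a % 2 == 0:
--             if e1 is None or a > e1:
--                 e1, e2 = a, e1
--             elif e2 is None or a > e2:
--                 e2 = a
--         else:
--             if o1 is None or a > o1:
--                 o1, o2 = a, o1
--             elif o2 is None or a > o2:
--                 o2 = a
--     res = -1
--     if e2 is not None:
--         res = max(res, e1 + e2)
--     if o2 is not None:
--         res = max(res, o1 + o2)
--     return res
-- ===== Notes on version B (the rewrite author's own statement) =====
-- stated objective: faster
-- what changed: Replaces partition-into-lists plus two sorts and negative indexing by a single pass that maintains the top two even and top two odd values in four variables, with no intermediate lists.
import Mathlib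
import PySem

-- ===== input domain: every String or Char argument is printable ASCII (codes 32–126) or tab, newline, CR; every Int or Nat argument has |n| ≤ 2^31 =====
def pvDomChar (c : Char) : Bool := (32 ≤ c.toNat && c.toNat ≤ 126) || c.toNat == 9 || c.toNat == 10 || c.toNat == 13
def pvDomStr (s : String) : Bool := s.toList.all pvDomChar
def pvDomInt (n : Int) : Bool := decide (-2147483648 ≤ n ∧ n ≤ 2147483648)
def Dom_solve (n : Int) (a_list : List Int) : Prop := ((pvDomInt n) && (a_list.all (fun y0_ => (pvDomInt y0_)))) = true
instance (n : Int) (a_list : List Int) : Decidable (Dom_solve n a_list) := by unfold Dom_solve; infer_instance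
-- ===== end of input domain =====

-- B replaces A's partition-into-lists plus two sorts (O(n log n)) by a single pass that keeps
-- the top two even and top two odd values in four variables (O(n)); same return value everywhere.

-- ===== PORT A =====
-- the '.getD 0' after pyGet? is only evaluated under the guard '2 ≤ length', where Python's
-- even[-1]/even[-2] are in range, so it is exact.
def solve (n : Int) (a_list : List Int) : Int :=
  let p := a_list.foldl (fun (p : List Int × List Int) a =>
      if PySem.Int.mod a 2 == 0 then (p.1 ++ [a], p.2) else (p.1, p.2 ++ [a])) ([], [])
  let even := PySem.List.sorted p.1 (fun x => x) false
  let odd := PySem.List.sorted p.2 (fun x => x) false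
  let res : Int := -1
  let res := if 2 ≤ even.length then
      max res ((PySem.List.pyGet? even (-1)).getD 0 + (PySem.List.pyGet? even (-2)).getD 0)
    else res
  let res := if 2 ≤ odd.length then
      max res ((PySem.List.pyGet? odd (-1)).getD 0 + (PySem.List.pyGet? odd (-2)).getD 0)
    else res
  res

-- ===== PORT B =====
-- the two-slot update: 'if b1 is None or a > b1: b1, b2 = a, b1 elif b2 is None or a > b2: b2 = a'
def top2Upd (s : Option Int × Option Int) (a : Int) : Option Int × Option Int :=
  match s with
  | (none, _) => (some a, none)
  | (some v1, b2) =>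
    if v1 < a then (some a, some v1)
    else
      match b2 with
      | none => (some v1, some a)
      | some v2 => if v2 < a then (some v1, some a) else (some v1, some v2)

def solve_alt (n : Int) (a_list : List Int) : Int :=
  let st := a_list.foldl
    (fun (s : (Option Int × Option Int) × (Option Int × Option Int)) a =>
      if PySem.Int.mod a 2 == 0 then (top2Upd s.1 a, s.2) else (s.1, top2Upd s.2 a))
    ((none, none), (none, none))
  let res : Int := -1
  let res := match st.1 with
    | (some v1, some v2) => max res (v1 + v2)
    | _ => res
  let res := match st.2 with
    | (some v1, some v2) => max res (v1 + v2)
    | _ => res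
  res

-- ===== PRECONDITION & SPEC =====
def Spec_solve (n : Int) (a_list : List Int) (out : Int) : Prop := out = solve_alt n a_list
instance (n : Int) (a_list : List Int) (out : Int) : Decidable (Spec_solve n a_list out) := by unfold Spec_solve; infer_instance

-- ===== CLAIM (what is proved, stated in full; the proofs are below) =====
def Claim_equal_solve : Prop := ∀ (n : Int) (a_list : List Int), Dom_solve n a_list → Spec_solve n a_list (solve n a_list)

-- ===== LEMMAS AND PROOFS =====

-- A's partition loop builds the two filtered sublists
theorem partition_foldl (l e o : List Int) :
    l.foldl (fun (p : List Int × List Int) a =>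
      if PySem.Int.mod a 2 == 0 then (p.1 ++ [a], p.2) else (p.1, p.2 ++ [a])) (e, o)
    = (e ++ l.filter (fun a => PySem.Int.mod a 2 == 0),
       o ++ l.filter (fun a => !(PySem.Int.mod a 2 == 0))) := by
  induction l generalizing e o with
  | nil => simp
  | cons x xs ih =>
    by_cases hx : (PySem.Int.mod x 2 == 0) = true
    · simp only [List.foldl_cons, List.filter_cons, hx, Bool.not_true, Bool.false_eq_true,
        if_true, if_false, ih, List.append_assoc, List.singleton_append]
    · have hx' : (PySem.Int.mod x 2 == 0) = false := by simpa using hx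
      simp only [List.foldl_cons, List.filter_cons, hx', Bool.not_false, Bool.false_eq_true,
        if_true, if_false, ih, List.append_assoc, List.singleton_append]

-- B's combined loop splits into two independent folds over the filtered sublists
theorem split_foldl (l : List Int) (s : (Option Int × Option Int) × (Option Int × Option Int)) :
    l.foldl (fun s a =>
        if PySem.Int.mod a 2 == 0 then (top2Upd s.1 a, s.2) else (s.1, top2Upd s.2 a)) s
    = ((l.filter (fun a => PySem.Int.mod a 2 == 0)).foldl top2Upd s.1,
       (l.filter (fun a => !(PySem.Int.mod a 2 == 0))).foldl top2Upd s.2) := by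
  induction l generalizing s with
  | nil => simp
  | cons x xs ih =>
    by_cases hx : (PySem.Int.mod x 2 == 0) = true
    · simp only [List.foldl_cons, List.filter_cons, hx, Bool.not_true, Bool.false_eq_true,
        if_true, if_false, ih]
    · have hx' : (PySem.Int.mod x 2 == 0) = false := by simpa using hx
      simp only [List.foldl_cons, List.filter_cons, hx', Bool.not_false, Bool.false_eq_true,
        if_true, if_false, ih]

-- the two-slot update is right-commutative
theorem top2Upd_comm (s : Option Int × Option Int) (a b : Int) :
    top2Upd (top2Upd s a) b = top2Upd (top2Upd s b) a := by
  rcases s with ⟨_ | v1, _ | v2⟩ <;>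
    simp only [top2Upd] <;>
    split_ifs <;>
    (try simp only [top2Upd]) <;>
    (try split_ifs) <;>
    first
      | rfl
      | (simp_all <;> omega)

-- folding the two-slot update over an ascending list yields its last two elements
theorem foldl_top2Upd_sorted (s : List Int) (hs : s.Pairwise (· ≤ ·)) :
    s.foldl top2Upd (none, none) = (s.getLast?, s.dropLast.getLast?) := by
  induction s using List.reverseRecOn with
  | nil => simp
  | append_singleton s a ih =>
    have hps : s.Pairwise (· ≤ ·) := (List.pairwise_append.1 hs).1
    have hle : ∀ y ∈ s, y ≤ a := by
      intro y hy
      exact (List.pairwise_append.1 hs).2.2 y hy a (by simp)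
    rw [List.foldl_append, ih hps]
    simp only [List.foldl_cons, List.foldl_nil]
    rcases hsn : s.getLast? with _ | m
    · -- s = []
      have : s = [] := List.getLast?_eq_none_iff.1 hsn
      subst this
      simp [top2Upd]
    · have hmem : m ∈ s := List.mem_of_getLast? hsn
      have hma : m ≤ a := hle m hmem
      have hlast : (s ++ [a]).getLast? = some a := by simp
      have hdrop : (s ++ [a]).dropLast = s := by simp
      rcases lt_or_eq_of_le hma with hlt | heq
      · simp [top2Upd, hlt, hlast, hdrop, hsn]
      · subst heq
        rcases hdn : s.dropLast.getLast? with _ | v2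
        · simp [top2Upd, hlast, hdrop, hsn]
        · have hv2 : v2 ≤ m := by
            have : v2 ∈ s.dropLast := List.mem_of_getLast? hdn
            exact hle v2 (List.dropLast_subset s this)
          by_cases h2 : v2 < m
          · simp [top2Upd, h2, hlast, hdrop, hsn]
          · have : v2 = m := le_antisymm hv2 (not_lt.1 h2)
            subst this
            simp [top2Upd, hlast, hdrop, hsn]

-- folding the two-slot update over any list yields the last two elements of its sorted version
theorem foldl_top2Upd (xs : List Int) :
    xs.foldl top2Upd (none, none)
      = ((PySem.List.sorted xs (fun x => x) false).getLast?,
         (PySem.List.sorted xs (fun x => x) false).dropLast.getLast?) := by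
  have hperm : xs.Perm (PySem.List.sorted xs (fun x => x) false) :=
    (PySem.List.sorted_perm xs (fun x => x) false).symm
  rw [List.Perm.foldl_eq' hperm (fun x _ y _ z => top2Upd_comm z x y) (none, none)]
  exact foldl_top2Upd_sorted _ (PySem.List.sorted_pairwise xs (fun x => x))

-- A's guarded sum of the last two elements equals B's match on the top-two pair
theorem tail_sum_eq (s : List Int) (r : Int) :
    (if 2 ≤ s.length then
        max r ((PySem.List.pyGet? s (-1)).getD 0 + (PySem.List.pyGet? s (-2)).getD 0)
      else r)
    = (match (s.getLast?, s.dropLast.getLast?) with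
       | (some v1, some v2) => max r (v1 + v2)
       | _ => r) := by
  by_cases h : 2 ≤ s.length
  · have h1 : 1 ≤ s.length := by omega
    have hlast : s.getLast? = s[s.length - 1]? := List.getLast?_eq_getElem?
    have hdl : s.dropLast.getLast? = s[s.length - 2]? := by
      rw [List.getLast?_eq_getElem?, List.getElem?_dropLast, List.length_dropLast]
      have : s.length - 1 - 1 = s.length - 2 := by omega
      rw [this, if_pos (by omega)]
    rcases he1 : s[s.length - 1]? with _ | v1
    · rw [List.getElem?_eq_none_iff] at he1; omega
    rcases he2 : s[s.length - 2]? with _ | v2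
    · rw [List.getElem?_eq_none_iff] at he2; omega
    rw [if_pos h, PySem.List.pyGet?_neg_one,
        PySem.List.pyGet?_neg_ofNat s 2 (by omega) (by omega),
        hlast, hdl, he1, he2]
    rfl
  · rw [if_neg h]
    have : s.dropLast.getLast? = none := by
      rw [List.getLast?_eq_none_iff]
      rw [← List.length_eq_zero_iff, List.length_dropLast]
      omega
    rw [this]
    rcases s.getLast? with _ | v1 <;> rfl

-- ===== VERDICT (by name: the statement is the Claim_ definition above) =====
theorem solve_spec : Claim_equal_solve := by
  intro n a_list _
  unfold Spec_solve solve solve_alt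
  rw [partition_foldl, split_foldl]
  simp only [List.nil_append]
  rw [foldl_top2Upd, foldl_top2Upd, ← tail_sum_eq, ← tail_sum_eq]
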